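-- pv_equiv track=rewrite | github.com/outragedevs/repartee | scripts/weechat/rpe2e.py | _parse_kv_strict
-- ===== SOURCE A (Python) =====
-- def _parse_kv_strict(fields: list[str]) -> dict[str, str] | None:
--     """Parse `k=v` fields with strict duplicate rejection.
--
--     Mirrors Rust `src/e2e/handshake.rs::parse_kv` — if the same key appears
--     twice in the same handshake body we return None rather than silently
--     last-wins. An ambiguous body like `chan=#a chan=#b` could otherwise
--     let a crafted payload shift the semantic channel of a signed
--     KEYREQ/KEYRSP/REKEY after the fact.
--     """
--     out: dict[str, str] = {}
--     for p in fields: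
--         if "=" in p:
--             k, v = p.split("=", 1)
--             if k in out:
--                 return None
--             out[k] = v
--     return out
-- ===== SOURCE B (Python) =====
-- def _parse_kv_strict(fields: list[str]) -> dict[str, str] | None:
--     """Sort-then-adjacent-scan duplicate detection: collect all (k, v) pairs,
--     sort the keys and reject if any two adjacent sorted keys are equal
--     (a list has a duplicate iff its sorted form has two equal neighbours),
--     then construct the dict."""
--     pairs = [tuple(p.split("=", 1)) for p in fields if "=" in p]
--     ks = sorted(k for k, _v in pairs)
--     for i in range(1, len(ks)):
--         if ks[i - 1] == ks[i]:
--             return None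
--     return dict(pairs)
-- ===== Notes on version B (the rewrite author's own statement) =====
-- stated objective: alternative
-- what changed: A's single early-exiting loop with an incremental hash-membership duplicate check is replaced by a sort-based algorithm: collect all (k, v) pairs, sort the keys, detect any duplicate as two equal adjacent elements of the sorted key list, then build the dict in one construction.
import Mathlib
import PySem

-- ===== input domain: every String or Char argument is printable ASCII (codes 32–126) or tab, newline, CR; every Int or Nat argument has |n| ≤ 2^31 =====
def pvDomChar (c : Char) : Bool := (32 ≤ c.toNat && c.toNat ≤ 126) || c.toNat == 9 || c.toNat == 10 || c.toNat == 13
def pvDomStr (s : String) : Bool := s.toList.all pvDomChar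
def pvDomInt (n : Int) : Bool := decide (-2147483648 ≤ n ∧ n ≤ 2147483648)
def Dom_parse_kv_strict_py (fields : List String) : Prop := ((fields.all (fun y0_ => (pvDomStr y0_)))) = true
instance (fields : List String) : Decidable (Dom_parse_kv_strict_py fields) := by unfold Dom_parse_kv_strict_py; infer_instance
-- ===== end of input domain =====

-- B replaces A's single early-exiting loop (incremental hash-membership duplicate check) by a
-- sort-based algorithm: collect all pairs, sort the keys, detect a duplicate as two equal
-- adjacent sorted keys, then build the dict once; objective: alternative (different algorithm).


-- ===== PORT A =====
-- the for-loop of A: dict `out` threaded through, early `return None` on a duplicate key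
def parse_kv_strict_py_go (out : PySem.Dict String String) (fields : List String) :
    Option (PySem.Dict String String) :=
  match fields with
  | [] => some out
  | p :: rest =>
    if PySem.Str.isIn "=" p then
      match PySem.Str.splitMax? p "=" 1 with
      | some [k, v] =>
        if out.contains k then none
        else parse_kv_strict_py_go (out.insert k v) rest
      | _ => none   -- unreachable: "=" in p guarantees exactly two parts
    else parse_kv_strict_py_go out rest

def parse_kv_strict_py (fields : List String) : Option (List (String × String)) :=
  (parse_kv_strict_py_go PySem.Dict.empty fields).map PySem.Dict.items

-- ===== PORT B =====
-- tuple(p.split("=", 1)) for a field p containing "="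
def pvSplitPair (p : String) : String × String :=
  match PySem.Str.splitMax? p "=" 1 with
  | some [k, v] => (k, v)
  | _ => ("", "")   -- unreachable: pvSplitPair is only applied to fields containing "="

-- the index loop 'for i in range(1, len(ks)): if ks[i-1] == ks[i]: return None' as an
-- adjacent-pair scan over the sorted key list
def pvAdjacentDup : List String → Bool
  | a :: b :: t => a == b || pvAdjacentDup (b :: t)
  | _ => false

def parse_kv_strict_py_alt (fields : List String) : Option (List (String × String)) :=
  let pairs := (fields.filter (fun p => PySem.Str.isIn "=" p)).map pvSplitPair
  let ks := PySem.List.sorted (pairs.map Prod.fst) (fun x => x) false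
  if pvAdjacentDup ks then none
  else some (PySem.Dict.ofList pairs).items

-- ===== PRECONDITION & SPEC =====
def Spec_parse_kv_strict_py (fields : List String) (out : Option (List (String × String))) : Prop := out = parse_kv_strict_py_alt fields
instance (fields : List String) (out : Option (List (String × String))) : Decidable (Spec_parse_kv_strict_py fields out) := by unfold Spec_parse_kv_strict_py; infer_instance

-- ===== CLAIM (what is proved, stated in full; the proofs are below) =====
def Claim_equal_parse_kv_strict_py : Prop := ∀ (fields : List String), Dom_parse_kv_strict_py fields → Spec_parse_kv_strict_py fields (parse_kv_strict_py fields)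

-- ===== LEMMAS AND PROOFS =====

-- once maxsplit has dropped to 0, splitOnMax.go emits the rest of the string as the last piece
lemma pvGoZero (sep : List Char) (fuel : Nat) (s cur : List Char) (acc : List (List Char)) :
    PySem.Chars.splitOnMax.go sep fuel 0 s cur acc = acc.reverse ++ [cur.reverse ++ s] := by
  cases fuel with
  | zero => simp [PySem.Chars.splitOnMax.go]
  | succ n =>
    cases s with
    | nil => simp [PySem.Chars.splitOnMax.go]
    | cons c rest => simp [PySem.Chars.splitOnMax.go]

-- with maxsplit = 1 and '=' present, splitOnMax.go yields exactly two pieces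
lemma pvGoShape :
    ∀ (fuel : Nat) (s cur : List Char), s.length < fuel → '=' ∈ s →
      ∃ k v, PySem.Chars.splitOnMax.go ['='] fuel 1 s cur [] = [k, v] := by
  intro fuel
  induction fuel with
  | zero => intro s cur h; exact absurd h (Nat.not_lt_zero _)
  | succ n ih =>
    intro s cur hlen hmem
    cases s with
    | nil => simp at hmem
    | cons c rest =>
      by_cases hc : c = '='
      · subst hc
        refine ⟨cur.reverse, rest, ?_⟩
        simp [PySem.Chars.splitOnMax.go, List.isPrefixOf, pvGoZero]
      · have hm : '=' ∈ rest := by simpa [hc, eq_comm] using hmem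
        obtain ⟨k, v, hkv⟩ := ih rest (c :: cur) (by simpa using Nat.lt_of_succ_lt_succ hlen) hm
        refine ⟨k, v, ?_⟩
        rw [show PySem.Chars.splitOnMax.go ['='] (n+1) 1 (c :: rest) cur [] =
              PySem.Chars.splitOnMax.go ['='] n 1 rest (c :: cur) [] from by
          simp [PySem.Chars.splitOnMax.go, List.isPrefixOf, Ne.symm hc]]
        exact hkv

-- p.split("=", 1) has exactly two parts when "=" in p
lemma pvSplitShape (p : String) (hp : PySem.Str.isIn "=" p = true) :
    ∃ k v, PySem.Str.splitMax? p "=" 1 = some [k, v] := by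
  have hmem : '=' ∈ p.toList := by
    have h := (PySem.Str.isIn_iff_infix "=" p).mp hp
    exact (List.singleton_infix_iff _ _).mp (by simpa using h)
  obtain ⟨k, v, hkv⟩ := pvGoShape (p.toList.length + 1) p.toList [] (Nat.lt_succ_self _) hmem
  have hchars : PySem.Chars.splitMax? p.toList ['='] 1 = some [k, v] := by
    simp only [PySem.Chars.splitMax?, PySem.Chars.splitOnMax]
    rw [if_neg (by decide), if_neg (by decide)]
    exact congrArg some hkv
  refine ⟨String.ofList k, String.ofList v, ?_⟩
  have hstr : ("=" : String).toList = ['='] := by decide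
  simp only [PySem.Str.splitMax?, hstr, hchars, Option.map_some, List.map_cons, List.map_nil]

-- the adjacent-pair scan returns false exactly on adjacent-distinct lists
lemma pvAdjDup_false_iff_chain (l : List String) :
    pvAdjacentDup l = false ↔ l.IsChain (· ≠ ·) := by
  induction l with
  | nil => simp [pvAdjacentDup]
  | cons a t ih =>
    cases t with
    | nil => simp [pvAdjacentDup]
    | cons b t' =>
      rw [List.isChain_cons_cons]
      simp only [pvAdjacentDup, Bool.or_eq_false_iff, beq_eq_false_iff_ne]
      exact (and_congr Iff.rfl ih)

-- a ≤-ordered list with distinct neighbours has no duplicates (and conversely)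
lemma pvSortedChainNodup (l : List String) (hs : l.Pairwise (· ≤ ·)) :
    l.IsChain (· ≠ ·) ↔ l.Nodup := by
  constructor
  · intro hc
    have hlt : l.Pairwise (· < ·) := by
      induction l with
      | nil => exact List.Pairwise.nil
      | cons a t ih =>
        rcases List.pairwise_cons.mp hs with ⟨hale, ht⟩
        rcases List.isChain_cons.mp hc with ⟨hne, hct⟩
        refine List.pairwise_cons.mpr ⟨?_, ih ht hct⟩
        cases t with
        | nil => intro x hx; simp at hx
        | cons b t' =>
          intro x hx
          have hab : a < b := lt_of_le_of_ne (hale b (List.mem_cons_self ..))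
            (hne b rfl)
          rcases List.mem_cons.mp hx with hxb | hxt'
          · exact hxb ▸ hab
          · have hbx : b ≤ x := (List.pairwise_cons.mp ht).1 x hxt'
            exact lt_of_lt_of_le hab hbx
    exact hlt.imp ne_of_lt
  · intro hnd
    exact List.Pairwise.isChain hnd

-- A's loop characterised: starting from a dict d with distinct keys, it returns the extension of
-- d by exactly the pairs list when all keys stay distinct, and None otherwise
lemma pvGoChar (fields : List String) :
    ∀ (d : PySem.Dict String String), d.keys.Nodup →
      (parse_kv_strict_py_go d fields).map PySem.Dict.items =
        if (d.keys ++ ((fields.filter (fun p => PySem.Str.isIn "=" p)).map pvSplitPair).map Prod.fst).Nodup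
        then some (d.items ++ (fields.filter (fun p => PySem.Str.isIn "=" p)).map pvSplitPair)
        else none := by
  induction fields with
  | nil => intro d hd; simp [parse_kv_strict_py_go, hd]
  | cons p rest ih =>
    intro d hd
    by_cases hp : PySem.Str.isIn "=" p = true
    · obtain ⟨k, v, hkv⟩ := pvSplitShape p hp
      have hp' : PySem.Chars.isIn ['='] p.toList = true := by
        simpa using hp
      have hpair : pvSplitPair p = (k, v) := by simp [pvSplitPair, hkv]
      rw [show parse_kv_strict_py_go d (p :: rest) =
            (if d.contains k then none else parse_kv_strict_py_go (d.insert k v) rest) from by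
        simp [parse_kv_strict_py_go, hp', hkv]]
      rw [List.filter_cons_of_pos (by simpa using hp)]
      simp only [List.map_cons, hpair]
      by_cases hk : d.contains k = true
      · have hkmem : k ∈ d.keys := (PySem.Dict.contains_iff_mem_keys d k).mp hk
        rw [if_pos hk, if_neg]
        · simp
        · intro hnd
          rcases (List.nodup_append.mp hnd) with ⟨-, -, hdisj⟩
          exact hdisj k hkmem k (List.mem_cons_self ..) rfl
      · have hkf : d.contains k = false := by simpa using hk
        rw [if_neg (by simp [hkf])]
        rw [ih (d.insert k v) (PySem.Dict.nodup_keys_insert d k v hd)]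
        rw [PySem.Dict.keys_insert_of_not_contains d v hkf,
            PySem.Dict.items_insert_of_not_contains d v hkf]
        simp [List.append_assoc]
    · have hpf : PySem.Chars.isIn ['='] p.toList = false := by
        simpa using hp
      rw [show parse_kv_strict_py_go d (p :: rest) = parse_kv_strict_py_go d rest from by
        simp [parse_kv_strict_py_go, hpf]]
      rw [List.filter_cons_of_neg (by simp [hpf])]
      exact ih d hd

-- ===== VERDICT (by name: the statement is the Claim_ definition above) =====
theorem parse_kv_strict_py_spec : Claim_equal_parse_kv_strict_py := by
  intro fields _dom
  unfold Spec_parse_kv_strict_py parse_kv_strict_py parse_kv_strict_py_alt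
  rw [pvGoChar fields PySem.Dict.empty (by simp)]
  set pairs := (fields.filter (fun p => PySem.Str.isIn "=" p)).map pvSplitPair with hpairs
  have hkeys : (PySem.Dict.empty : PySem.Dict String String).keys = [] := rfl
  have hitems0 : (PySem.Dict.empty : PySem.Dict String String).items = [] := rfl
  rw [hkeys, hitems0, List.nil_append, List.nil_append]
  set ks := PySem.List.sorted (pairs.map Prod.fst) (fun x => x) false with hks
  have hperm : ks.Perm (pairs.map Prod.fst) := PySem.List.sorted_perm ..
  have hord : ks.Pairwise (· ≤ ·) := PySem.List.sorted_pairwise ..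
  have hiff : pvAdjacentDup ks = false ↔ (pairs.map Prod.fst).Nodup := by
    rw [pvAdjDup_false_iff_chain, pvSortedChainNodup ks hord]
    exact hperm.nodup_iff
  by_cases hnd : (pairs.map Prod.fst).Nodup
  · rw [if_pos hnd, if_neg (by rw [hiff.mpr hnd]; simp)]
    have hitems : (PySem.Dict.ofList pairs).items = pairs := by
      have h := PySem.Dict.items_foldl_insert_fresh pairs Prod.fst Prod.snd
        (PySem.Dict.empty : PySem.Dict String String) (by simp) hnd
      simpa [PySem.Dict.ofList, PySem.Dict.update] using h
    rw [hitems]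
  · rw [if_neg hnd, if_pos]
    cases hdup : pvAdjacentDup ks with
    | false => exact absurd (hiff.mp hdup) hnd
    | true => rfl
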